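-- pv_equiv track=rewrite | github.com/Carlos-droid/FinRobot | benchmark_ragquery.py | optimized_dict_concat
-- ===== SOURCE A (Python) =====
-- def optimized_dict_concat(docs):
--     relevant_section_dict = {}
--     for doc in docs:
--         section = doc['section_name']
--         section_text = doc['page_content']
--         if section not in relevant_section_dict:
--             relevant_section_dict[section] = [section_text]
--         else:
--             relevant_section_dict[section].append(section_text)
--     return {k: " ".join(v) for k, v in relevant_section_dict.items()}
-- ===== SOURCE B (Python) =====
-- def optimized_dict_concat(docs):
--     sections = list(dict.fromkeys(doc['section_name'] for doc in docs))
--     return {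
--         s: " ".join(doc['page_content'] for doc in docs if doc['section_name'] == s)
--         for s in sections
--     }
-- ===== Notes on version B (the rewrite author's own statement) =====
-- stated objective: alternative
-- what changed: Replaces the incremental dict-of-lists accumulation plus final join pass with a dedup of section names in first-occurrence order followed by, per section, a single filtered-scan comprehension joined directly.
import Mathlib
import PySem

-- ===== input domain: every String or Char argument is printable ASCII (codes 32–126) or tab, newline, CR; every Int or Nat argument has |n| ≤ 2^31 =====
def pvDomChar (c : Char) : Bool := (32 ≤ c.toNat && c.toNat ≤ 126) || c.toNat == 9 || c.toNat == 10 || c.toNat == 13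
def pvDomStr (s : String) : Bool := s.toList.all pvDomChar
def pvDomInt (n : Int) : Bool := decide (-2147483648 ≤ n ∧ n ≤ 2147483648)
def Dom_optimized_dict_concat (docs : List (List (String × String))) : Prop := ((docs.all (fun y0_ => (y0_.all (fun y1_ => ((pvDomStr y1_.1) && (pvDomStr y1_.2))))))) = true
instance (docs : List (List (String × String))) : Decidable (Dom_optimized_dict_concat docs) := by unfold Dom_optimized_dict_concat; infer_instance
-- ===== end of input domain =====

-- B replaces A's incremental dict-of-lists accumulation (+ final join pass) with a dedup of
-- section names in first-occurrence order and, per section, one filtered scan joined directly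
-- (objective: alternative decomposition, not faster).

-- ===== PORT A =====
-- doc['k'] = first match in the association list; total via getD "" — exact under Pre_ (both keys present)
def optimized_dict_concat (docs : List (List (String × String))) : List (String × String) :=
  let d := docs.foldl
    (fun (d : PySem.Dict String (List String)) doc =>
      let sec := (List.lookup "section_name" doc).getD ""
      let text := (List.lookup "page_content" doc).getD ""
      if d.contains sec = false then d.insert sec [text]   -- if section not in dict
      else d.modify sec [] (fun v => v ++ [text]))             -- else: dict[section].append(text)
    PySem.Dict.empty
  d.items.map (fun kv => (kv.1, PySem.Str.join " " kv.2))

-- ===== PORT B =====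
def optimized_dict_concat_alt (docs : List (List (String × String))) : List (String × String) :=
  let sections := PySem.List.dedup (docs.map (fun doc => (List.lookup "section_name" doc).getD ""))
  sections.map (fun s =>
    (s, PySem.Str.join " "
      ((docs.filter (fun doc => (List.lookup "section_name" doc).getD "" == s)).map
        (fun doc => (List.lookup "page_content" doc).getD ""))))

-- ===== PRECONDITION & SPEC =====
-- Pre_: exactly the inputs on which Python A returns (every doc has both keys; otherwise A raises KeyError)
def Pre_optimized_dict_concat (docs : List (List (String × String))) : Prop :=
  ∀ doc ∈ docs, (List.lookup "section_name" doc).isSome ∧ (List.lookup "page_content" doc).isSome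
instance (docs : List (List (String × String))) : Decidable (Pre_optimized_dict_concat docs) := by
  unfold Pre_optimized_dict_concat; infer_instance
def pvWitness_optimized_dict_concat : (List (List (String × String))) :=
  [[("section_name", "a"), ("page_content", "x")], [("section_name", "a"), ("page_content", "y")]]
def Spec_optimized_dict_concat (docs : List (List (String × String))) (out : List (String × String)) : Prop := out = optimized_dict_concat_alt docs
instance (docs : List (List (String × String))) (out : List (String × String)) : Decidable (Spec_optimized_dict_concat docs out) := by unfold Spec_optimized_dict_concat; infer_instance

-- ===== CLAIM (what is proved, stated in full; the proofs are below) =====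
def Claim_equal_optimized_dict_concat : Prop := ∀ (docs : List (List (String × String))), Dom_optimized_dict_concat docs → Pre_optimized_dict_concat docs → Spec_optimized_dict_concat docs (optimized_dict_concat docs)

-- ===== LEMMAS AND PROOFS =====

-- section / text accessors (proof-side abbreviations for the shared lookups)
def pvSec (doc : List (String × String)) : String := (List.lookup "section_name" doc).getD ""
def pvTxt (doc : List (String × String)) : String := (List.lookup "page_content" doc).getD ""

-- A's branchy step is extensionally the uniform "append under the key" modify step
lemma stepA_eq_modify (d : PySem.Dict String (List String)) (s t : String) :
    (if d.contains s = false then d.insert s [t] else d.modify s [] (fun v => v ++ [t]))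
      = d.modify s [] (fun v => v ++ [t]) := by
  rw [PySem.Dict.modify.eq_1]
  by_cases h : d.contains s
  · simp [h]
  · simp only [Bool.not_eq_true] at h
    rw [PySem.Dict.getD_of_not_contains d [] h]
    simp [h]

-- keys of the grouping fold: first-occurrence-ordered set of the keys seen
lemma keys_grouping_fold (l : List (String × String)) (d : PySem.Dict String (List String)) :
    (l.foldl (fun d p => d.modify p.1 [] (fun v => v ++ [p.2])) d).keys
      = PySem.Set.update d.keys (l.map (·.1)) := by
  induction l generalizing d with
  | nil => simp [PySem.Set.update_nil]
  | cons p l ih =>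
    rw [List.foldl_cons, ih, List.map_cons, PySem.Set.update_cons]
    congr 1
    rw [PySem.Dict.keys_modify]
    by_cases h : d.contains p.1
    · rw [PySem.Dict.keys_insert_of_contains _ _ h,
          PySem.Set.add_of_mem (by exact (PySem.Dict.contains_iff_mem_keys d p.1).mp h)]
    · simp only [Bool.not_eq_true] at h
      rw [PySem.Dict.keys_insert_of_not_contains _ _ h,
          PySem.Set.add_of_not_mem
            (by intro hm; rw [(PySem.Dict.contains_iff_mem_keys d p.1).mpr hm] at h; cases h)]

theorem optimized_dict_concat_eq_alt (docs : List (List (String × String))) :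
    optimized_dict_concat docs = optimized_dict_concat_alt docs := by
  unfold optimized_dict_concat optimized_dict_concat_alt
  simp only [stepA_eq_modify]
  have hfold :
      docs.foldl (fun (d : PySem.Dict String (List String)) doc =>
          d.modify (pvSec doc) [] (fun v => v ++ [pvTxt doc])) PySem.Dict.empty
        = (docs.map (fun doc => (pvSec doc, pvTxt doc))).foldl
            (fun d p => d.modify p.1 [] (fun v => v ++ [p.2])) PySem.Dict.empty := by
    rw [List.foldl_map]
  show (docs.foldl (fun (d : PySem.Dict String (List String)) doc =>
          d.modify (pvSec doc) [] (fun v => v ++ [pvTxt doc])) PySem.Dict.empty).items.map _ = _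
  rw [hfold]
  set l := docs.map (fun doc => (pvSec doc, pvTxt doc)) with hl
  set D := l.foldl (fun (d : PySem.Dict String (List String)) p =>
      d.modify p.1 [] (fun v => v ++ [p.2])) PySem.Dict.empty with hD
  have hkeys : D.keys = PySem.Set.ofList (docs.map pvSec) := by
    rw [hD, keys_grouping_fold, PySem.Dict.keys_empty, PySem.Set.update_nil_left, hl,
        List.map_map]
    rfl
  have hnd : D.keys.Nodup := by rw [hkeys]; exact PySem.Set.nodup_ofList _
  rw [PySem.Dict.items_eq_map_keys D hnd [], List.map_map, hkeys,
      ← PySem.List.dedup_eq_ofList]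
  apply List.map_congr_left
  intro k _
  have hg : D.getD k [] = (l.filter (fun p => p.1 == k)).map (·.2) := by
    rw [hD, PySem.Dict.getD_foldl_modify_append, PySem.Dict.getD_empty, List.nil_append]
  simp only [Function.comp, hg, hl, List.filter_map, List.map_map]
  rfl

-- ===== VERDICT (by name: the statement is the Claim_ definition above) =====
theorem optimized_dict_concat_spec : Claim_equal_optimized_dict_concat := by
  intro docs _ _
  unfold Spec_optimized_dict_concat
  exact optimized_dict_concat_eq_alt docs
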